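-- pv_equiv track=rewrite | github.com/daishuanglu/aspectnlp | aspectnlp/text_relevancy.py | __find_common_subsequences__
-- ===== SOURCE A (Python) =====
-- def __find_common_subsequences__(list1, list2):
--
--     sequences1 = []
--     for i in range(len(list1)+1):
--         for j in range(i+1, len(list1)+1):
--             sequences1.append(tuple(list1[i:j]))
--
--     sequences2 = []
--     for i in range(len(list2)+1):
--         for j in range(i+1, len(list2)+1):
--             sequences2.append(tuple(list2[i:j]))
--
--     intersection = set(sequences1) & set(sequences2)
--
--     return intersection
-- ===== SOURCE B (Python) =====
-- def __find_common_subsequences__(list1, list2):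
--     # Classic longest-common-run DP: nxt[j] = length of the longest common run
--     # starting at list1[i+1] and list2[j+1]; best[i] = longest common substring
--     # of list2 that starts at position i of list1.  Only actual matches are
--     # ever materialized as tuples; no substring of list2 is ever built.
--     m = len(list2)
--     nxt = [0] * m
--     best = []
--     for x in reversed(list1):
--         cur = [v + 1 if x == y else 0 for y, v in zip(list2, nxt[1:] + [0])]
--         best.append(max(cur, default=0))
--         nxt = cur
--     best.reverse()
--     result = set()
--     for i, b in enumerate(best):
--         for l in range(1, b + 1):
--             result.add(tuple(list1[i:i + l]))
--     return result
-- ===== Notes on version B (the rewrite author's own statement) =====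
-- stated objective: alternative
-- what changed: A enumerates every contiguous substring of both lists by slicing and intersects two sets; B runs the classic longest-common-run dynamic program (a rolling DP row over list2, scanned from the right) to find, for each start position of list1, the length of the longest match inside list2, and materializes only the actual common substrings.
import Mathlib
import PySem

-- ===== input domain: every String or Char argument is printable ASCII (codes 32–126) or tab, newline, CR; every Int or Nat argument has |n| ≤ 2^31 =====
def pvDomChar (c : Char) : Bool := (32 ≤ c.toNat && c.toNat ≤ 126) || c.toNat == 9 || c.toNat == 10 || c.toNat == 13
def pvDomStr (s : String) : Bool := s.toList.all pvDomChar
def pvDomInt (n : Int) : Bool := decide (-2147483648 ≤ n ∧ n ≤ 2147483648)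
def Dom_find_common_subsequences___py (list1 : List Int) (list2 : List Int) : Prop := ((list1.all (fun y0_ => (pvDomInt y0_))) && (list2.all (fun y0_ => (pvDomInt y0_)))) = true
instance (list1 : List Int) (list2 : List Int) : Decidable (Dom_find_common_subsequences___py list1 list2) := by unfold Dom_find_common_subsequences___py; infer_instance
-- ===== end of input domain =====

-- B replaces A's enumerate-everything-and-intersect with the classic longest-common-run DP:
-- it computes, per start position of list1, the longest match inside list2 and materializes
-- only actual common substrings (alternative algorithm, avoids building any substring of list2).

-- ===== PORT A =====
-- all contiguous substrings list[i:j] appended in order (i ascending, then j)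
def pvSubsA (l : List Int) : List (List Int) :=
  (PySem.List.pyRange 0 ((l.length : Int) + 1)).foldl (fun acc i =>
    (PySem.List.pyRange (i + 1) ((l.length : Int) + 1)).foldl (fun acc j =>
      acc ++ [PySem.List.slice l (some i) (some j)]) acc) []

def find_common_subsequences___py (list1 : List Int) (list2 : List Int) : List (List Int) :=
  PySem.Set.inter (PySem.Set.ofList (pvSubsA list1)) (PySem.Set.ofList (pvSubsA list2))

-- ===== PORT B =====
-- 'cur = [v + 1 if x == y else 0 for y, v in zip(list2, nxt[1:] + [0])]'
def pvRow (list2 : List Int) (x : Int) (nxt : List Int) : List Int :=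
  List.zipWith (fun y v => if x == y then v + 1 else 0) list2
    (PySem.List.slice nxt (some 1) none ++ [0])

-- 'max(cur, default=0)' — exact here because every entry of cur is ≥ 0
def pvMaxD (l : List Int) : Int := l.foldl max 0

-- 'for x in reversed(list1): … nxt = cur' carrying (nxt, best)
def pvLoop (list1 list2 : List Int) : List Int × List Int :=
  (list1.reverse).foldl
    (fun st x =>
      let cur := pvRow list2 x st.1
      (cur, st.2 ++ [pvMaxD cur]))
    (List.replicate list2.length 0, [])

-- 'for i, b in enumerate(best): for l in range(1, b+1): result.add(tuple(list1[i:i+l]))'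
def find_common_subsequences___py_alt (list1 : List Int) (list2 : List Int) : List (List Int) :=
  let best := (pvLoop list1 list2).2.reverse
  (PySem.List.enumerate best).foldl
    (fun res ib =>
      (PySem.List.pyRange 1 (ib.2 + 1)).foldl
        (fun res l => PySem.Set.add res (PySem.List.slice list1 (some ib.1) (some (ib.1 + l))))
        res)
    PySem.Set.empty

-- ===== PRECONDITION & SPEC =====
def Spec_find_common_subsequences___py (list1 : List Int) (list2 : List Int) (out : List (List Int)) : Prop := out = find_common_subsequences___py_alt list1 list2
instance (list1 : List Int) (list2 : List Int) (out : List (List Int)) : Decidable (Spec_find_common_subsequences___py list1 list2 out) := by unfold Spec_find_common_subsequences___py; infer_instance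

-- ===== CLAIM (what is proved, stated in full; the proofs are below) =====
def Claim_equal_find_common_subsequences___py : Prop := ∀ (list1 : List Int) (list2 : List Int), Dom_find_common_subsequences___py list1 list2 → Spec_find_common_subsequences___py list1 list2 (find_common_subsequences___py list1 list2)

-- ===== LEMMAS AND PROOFS =====

-- ---- shared characterisation of "all contiguous substrings" ----

-- the nonempty prefixes of xs, each preceded by t, in increasing length
def pvChain (t : List Int) : List Int → List (List Int)
  | [] => []
  | x :: rest => (t ++ [x]) :: pvChain (t ++ [x]) rest

-- all contiguous substrings of l, grouped by start position, by increasing length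
def pvE (l : List Int) : List (List Int) := l.tails.flatMap (pvChain [])

lemma pvChain_eq_map (xs : List Int) : ∀ t : List Int,
    pvChain t xs = (List.range xs.length).map (fun k => t ++ xs.take (k + 1)) := by
  induction xs with
  | nil => intro t; rfl
  | cons x rest ih =>
    intro t
    simp only [pvChain, ih (t ++ [x]), List.length_cons, List.range_succ_eq_map,
      List.map_cons, List.map_map]
    congr 1
    all_goals simp [Function.comp, List.take_succ_cons, List.append_assoc]

lemma mem_pvE (l u : List Int) : u ∈ pvE l ↔ u ≠ [] ∧ u <:+: l := by
  simp only [pvE, List.mem_flatMap, List.mem_tails]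
  constructor
  · rintro ⟨s, hs, hm⟩
    rw [pvChain_eq_map] at hm
    simp only [List.mem_map, List.mem_range, List.nil_append] at hm
    obtain ⟨k, hk, rfl⟩ := hm
    refine ⟨?_, ((List.take_prefix _ _).isInfix).trans hs.isInfix⟩
    intro hnil
    rw [List.take_eq_nil_iff] at hnil
    rcases hnil with h | h
    · omega
    · subst h; simp at hk
  · rintro ⟨hne, hinf⟩
    rw [List.infix_iff_prefix_suffix] at hinf
    obtain ⟨t, hp, hs⟩ := hinf
    refine ⟨t, hs, ?_⟩
    rw [pvChain_eq_map]
    simp only [List.mem_map, List.mem_range, List.nil_append]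
    have hlen : u.length ≠ 0 := by simpa [List.length_eq_zero_iff] using hne
    have hle : u.length ≤ t.length := hp.length_le
    refine ⟨u.length - 1, by omega, ?_⟩
    have h1 : u.length - 1 + 1 = u.length := by omega
    rw [h1, ← List.prefix_iff_eq_take.mp hp]

lemma pvE_cons (x : Int) (l : List Int) :
    pvE (x :: l) = pvChain [] (x :: l) ++ pvE l := by
  simp [pvE]

lemma contains_iff_mem (s : PySem.Set (List Int)) (u : List Int) :
    PySem.Set.contains s u = true ↔ u ∈ s := by
  simp [PySem.Set.contains]

-- ---- port A in terms of pvE (as in the enumeration order of A's loops) ----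

lemma pvPyRange_natCast (a b : Nat) :
    PySem.List.pyRange (a : Int) (b : Int)
      = (List.range (b - a)).map (fun k => ((a + k : Nat) : Int)) := by
  simp only [PySem.List.pyRange]
  rw [if_neg (by norm_num)]
  by_cases h : (a : Int) < (b : Int)
  · rw [if_pos (by norm_num), if_pos h]
    have h1 : (((b : Int) - a + 1 - 1) / 1).toNat = b - a := by omega
    rw [h1]
    apply List.map_congr_left
    intro k _
    push_cast
    ring
  · rw [if_pos (by norm_num), if_neg h]
    have : b - a = 0 := by omega
    rw [this]
    rfl

lemma pvE_eq_range (l : List Int) :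
    pvE l = (List.range (l.length + 1)).flatMap (fun i => pvChain [] (l.drop i)) := by
  induction l with
  | nil => rfl
  | cons x rest ih =>
    rw [pvE_cons, List.length_cons, List.range_succ_eq_map, List.flatMap_cons,
      List.flatMap_map, List.drop_zero, ih]
    simp only [Nat.succ_eq_add_one, List.drop_succ_cons]

lemma pvSubsA_eq_pvE (l : List Int) : pvSubsA l = pvE l := by
  have hflat : pvSubsA l
      = (PySem.List.pyRange 0 ((l.length : Int) + 1)).flatMap (fun i =>
          (PySem.List.pyRange (i + 1) ((l.length : Int) + 1)).map
            (fun j => PySem.List.slice l (some i) (some j))) := by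
    unfold pvSubsA
    rw [PySem.List.foldl_congr_mem _ _
      (fun acc i => acc ++ (PySem.List.pyRange (i + 1) ((l.length : Int) + 1)).map
        (fun j => PySem.List.slice l (some i) (some j))) []
      (fun acc i _ => PySem.List.foldl_append_singleton_eq_map _ _ acc)]
    exact (PySem.List.foldl_append_eq_flatMap _ _ []).trans (by simp)
  have hsuffix : ∀ i : Nat,
      (PySem.List.pyRange ((i : Int) + 1) ((l.length + 1 : Nat) : Int)).map
          (fun j => PySem.List.slice l (some (i : Int)) (some j))
        = pvChain [] (l.drop i) := by
    intro i
    have h1 : ((i : Int) + 1) = ((i + 1 : Nat) : Int) := by push_cast; ring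
    rw [h1, pvPyRange_natCast, List.map_map, pvChain_eq_map]
    have hlen : (l.drop i).length = l.length - i := by simp
    have h2 : l.length + 1 - (i + 1) = l.length - i := by omega
    rw [hlen, h2]
    apply List.map_congr_left
    intro k _
    simp only [Function.comp]
    rw [PySem.List.slice_natCast l i (i + 1 + k)]
    have h3 : i + 1 + k - i = k + 1 := by omega
    rw [h3, List.nil_append]
  have h0 : ((l.length : Int) + 1) = ((l.length + 1 : Nat) : Int) := by push_cast; ring
  rw [hflat, h0, PySem.List.pyRange_zero_natCast, List.flatMap_map, pvE_eq_range]
  simp only [hsuffix]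

lemma foldl_add_filter (p : List Int → Bool) (xs : List (List Int)) : ∀ s : PySem.Set (List Int),
    (xs.foldl PySem.Set.add s).filter p = (xs.filter p).foldl PySem.Set.add (s.filter p) := by
  induction xs with
  | nil => intro s; rfl
  | cons x rest ih =>
    intro s
    simp only [List.foldl_cons, List.filter_cons]
    by_cases hp : p x = true
    · rw [if_pos hp, ih, List.foldl_cons]
      congr 1
      simp only [PySem.Set.add]
      by_cases hc : PySem.Set.contains s x = true
      · rw [if_pos hc, if_pos ?_]
        rw [contains_iff_mem] at hc ⊢
        exact List.mem_filter.mpr ⟨hc, hp⟩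
      · rw [if_neg hc, if_neg ?_, List.filter_append, List.filter_cons, if_pos hp,
          List.filter_nil]
        intro hc'
        rw [contains_iff_mem] at hc hc'
        exact hc (List.mem_filter.mp hc').1
    · rw [if_neg hp, ih]
      congr 1
      simp only [PySem.Set.add]
      by_cases hc : PySem.Set.contains s x = true
      · rw [if_pos hc]
      · rw [if_neg hc, List.filter_append, List.filter_cons, if_neg hp, List.filter_nil,
          List.append_nil]

-- ---- the DP rows of port B ----

-- length of the longest common run at the heads of xs and ys
def pvLcp : List Int → List Int → Nat
  | [], _ => 0
  | _ :: _, [] => 0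
  | x :: xs, y :: ys => if x = y then pvLcp xs ys + 1 else 0

-- the mathematical value of the DP row for the suffix xs of list1
def pvMRow (xs : List Int) : List Int → List Int
  | [] => []
  | y :: ys => (pvLcp xs (y :: ys) : Int) :: pvMRow xs ys

lemma pvLcp_le_left (xs ys : List Int) : pvLcp xs ys ≤ xs.length := by
  induction xs generalizing ys with
  | nil => simp [pvLcp]
  | cons x xs ih =>
    cases ys with
    | nil => simp [pvLcp]
    | cons y ys =>
      simp only [pvLcp, List.length_cons]
      split_ifs
      · have := ih ys; omega
      · omega

lemma take_prefix_iff_le_pvLcp (l : Nat) (xs ys : List Int) (h : l ≤ xs.length) :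
    xs.take l <+: ys ↔ l ≤ pvLcp xs ys := by
  induction xs generalizing ys l with
  | nil =>
    have hl0 : l = 0 := Nat.le_zero.mp h
    subst hl0
    simp [pvLcp]
  | cons x xs ih =>
    cases l with
    | zero => simp
    | succ l =>
      cases ys with
      | nil => simp [pvLcp, List.take_succ_cons]
      | cons y ys =>
        simp only [List.take_succ_cons, List.cons_prefix_cons, pvLcp]
        split_ifs with hxy
        · subst hxy
          simp only [true_and]
          rw [ih l ys (by simpa using h)]
          omega
        · constructor
          · rintro ⟨rfl, -⟩; exact absurd rfl hxy
          · omega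

lemma mem_pvMRow' (xs ys : List Int) (v : Int) :
    v ∈ pvMRow xs ys ↔ ∃ t, t <:+ ys ∧ t ≠ [] ∧ v = (pvLcp xs t : Int) := by
  induction ys with
  | nil => simp [pvMRow]
  | cons y ys ih =>
    simp only [pvMRow, List.mem_cons, ih]
    constructor
    · rintro (rfl | ⟨t, ht, hne, rfl⟩)
      · exact ⟨y :: ys, List.suffix_refl _, by simp, rfl⟩
      · exact ⟨t, ht.trans (List.suffix_cons _ _), hne, rfl⟩
    · rintro ⟨t, ht, hne, rfl⟩
      rcases List.suffix_cons_iff.mp ht with rfl | ht'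
      · exact Or.inl rfl
      · exact Or.inr ⟨t, ht', hne, rfl⟩

lemma le_foldl_max (L : List Int) (a : Int) : ∀ s : Int,
    a ≤ L.foldl max s ↔ a ≤ s ∨ ∃ v ∈ L, a ≤ v := by
  induction L with
  | nil => simp
  | cons x L ih =>
    intro s
    simp only [List.foldl_cons, ih, le_max_iff, List.mem_cons]
    constructor
    · rintro ((h | h) | ⟨v, hv, h⟩)
      · exact Or.inl h
      · exact Or.inr ⟨x, Or.inl rfl, h⟩
      · exact Or.inr ⟨v, Or.inr hv, h⟩
    · rintro (h | ⟨v, (rfl | hv), h⟩)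
      · exact Or.inl (Or.inl h)
      · exact Or.inl (Or.inr h)
      · exact Or.inr ⟨v, hv, h⟩

lemma foldl_max_le (L : List Int) (c : Int) : ∀ s : Int, s ≤ c → (∀ v ∈ L, v ≤ c) →
    L.foldl max s ≤ c := by
  induction L with
  | nil => intro s hs _; simpa using hs
  | cons x L ih =>
    intro s hs hL
    exact ih _ (max_le hs (hL x (by simp))) (fun v hv => hL v (by simp [hv]))

lemma pvMaxD_nonneg (L : List Int) : 0 ≤ pvMaxD L := by
  unfold pvMaxD
  rw [le_foldl_max]
  exact Or.inl le_rfl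

lemma pvMaxD_pvMRow_le (xs ys : List Int) : pvMaxD (pvMRow xs ys) ≤ (xs.length : Int) := by
  unfold pvMaxD
  apply foldl_max_le
  · positivity
  · intro v hv
    obtain ⟨t, -, -, rfl⟩ := (mem_pvMRow' xs ys v).mp hv
    exact_mod_cast pvLcp_le_left xs t

-- the central characterisation: take (k+1) of a suffix is common iff k+1 ≤ the DP maximum
lemma infix_iff_lt_maxD (s l2 : List Int) (k : Nat) (hk : k < s.length) :
    s.take (k + 1) <:+: l2 ↔ (k : Int) + 1 ≤ pvMaxD (pvMRow s l2) := by
  constructor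
  · intro hinf
    rw [List.infix_iff_prefix_suffix] at hinf
    obtain ⟨t, hp, hs⟩ := hinf
    have hle : k + 1 ≤ pvLcp s t := (take_prefix_iff_le_pvLcp (k + 1) s t (by omega)).mp hp
    have hne : t ≠ [] := by
      rintro rfl
      rw [List.prefix_nil, List.take_eq_nil_iff] at hp
      rcases hp with h | h
      · omega
      · subst h; simp at hk
    unfold pvMaxD
    rw [le_foldl_max]
    exact Or.inr ⟨(pvLcp s t : Int), (mem_pvMRow' s l2 _).mpr ⟨t, hs, hne, rfl⟩, by exact_mod_cast hle⟩
  · intro hle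
    unfold pvMaxD at hle
    rw [le_foldl_max] at hle
    rcases hle with h | ⟨v, hv, h⟩
    · omega
    · obtain ⟨t, ht, -, rfl⟩ := (mem_pvMRow' s l2 v).mp hv
      have h' : k + 1 ≤ pvLcp s t := by exact_mod_cast h
      have hp : s.take (k + 1) <+: t :=
        (take_prefix_iff_le_pvLcp (k + 1) s t (by omega)).mpr h'
      exact List.infix_iff_prefix_suffix.mpr ⟨t, hp, ht⟩

-- ---- port B's loop computes pvMRow / pvBest ----

def pvBest (l2 : List Int) : List Int → List Int
  | [] => []
  | x :: xs => pvMaxD (pvMRow (x :: xs) l2) :: pvBest l2 xs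

lemma pvMRow_nil (ys : List Int) : pvMRow [] ys = List.replicate ys.length 0 := by
  induction ys with
  | nil => rfl
  | cons y ys ih => simp [pvMRow, pvLcp, ih, List.replicate_succ]

lemma pvRow_step (l2 xs : List Int) (x : Int) :
    pvRow l2 x (pvMRow xs l2) = pvMRow (x :: xs) l2 := by
  rw [pvRow, PySem.List.slice_from_one]
  induction l2 with
  | nil => rfl
  | cons y ys ih =>
    cases ys with
    | nil =>
      simp only [pvMRow, List.tail_cons, List.nil_append, List.zipWith_cons_cons,
        List.zipWith_nil_right, pvLcp, beq_iff_eq]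
      cases xs <;> split_ifs <;> simp_all [pvLcp]
    | cons y' ys' =>
      simp only [pvMRow, List.tail_cons] at ih ⊢
      simp only [List.cons_append, List.zipWith_cons_cons, beq_iff_eq] at ih ⊢
      rw [ih]
      congr 1
      show (if x = y then (pvLcp xs (y' :: ys') : Int) + 1 else 0) = (pvLcp (x :: xs) (y :: y' :: ys') : Int)
      simp only [pvLcp]
      split_ifs <;> push_cast <;> ring

lemma pvLoop_spec (l2 : List Int) (l1 : List Int) :
    pvLoop l1 l2 = (pvMRow l1 l2, (pvBest l2 l1).reverse) := by
  unfold pvLoop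
  rw [List.foldl_reverse]
  induction l1 with
  | nil => simp [pvMRow_nil, pvBest]
  | cons x xs ih =>
    rw [List.foldr_cons, ih]
    simp only [pvBest, List.reverse_cons]
    rw [pvRow_step]

-- ---- flattening port B's emission loops ----

lemma foldl_emit_eq_flatMap {α β : Type} (L : List α) (f : α → List β) (g : α → β → List Int) :
    ∀ s : PySem.Set (List Int),
    L.foldl (fun s a => (f a).foldl (fun s x => PySem.Set.add s (g a x)) s) s
      = (L.flatMap (fun a => (f a).map (g a))).foldl PySem.Set.add s := by
  induction L with
  | nil => intro s; rfl
  | cons x L ih => intro s; simp [List.foldl_append, List.foldl_map, ih]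

lemma range_filter_lt (m n : Nat) (h : m ≤ n) :
    (List.range n).filter (fun k => decide (k < m)) = List.range m := by
  induction n with
  | zero => interval_cases m; rfl
  | succ n ih =>
    rcases Nat.eq_or_lt_of_le h with rfl | h'
    · apply List.filter_eq_self.mpr
      intro k hk
      simpa using List.mem_range.mp hk
    · rw [List.range_succ, List.filter_append, ih (by omega)]
      simp [show ¬ n < m by omega]

-- one start position: the filtered chain is exactly port B's emitted slices
lemma group_eq (l1 l2 : List Int) (i : Nat) (hs : l1.drop i ≠ []) :
    (PySem.List.pyRange 1 (pvMaxD (pvMRow (l1.drop i) l2) + 1)).map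
        (fun l => PySem.List.slice l1 (some (i : Int)) (some ((i : Int) + l)))
      = (pvChain [] (l1.drop i)).filter
          (fun u => PySem.Set.contains (PySem.Set.ofList (pvE l2)) u) := by
  set s := l1.drop i with hsdef
  set b := pvMaxD (pvMRow s l2) with hb
  have hb0 : 0 ≤ b := pvMaxD_nonneg _
  have hble : b ≤ (s.length : Int) := pvMaxD_pvMRow_le _ _
  set bN := b.toNat with hbN
  have hbcast : b = (bN : Int) := by omega
  -- left side as a map over List.range bN
  have h2 : b + 1 = ((bN + 1 : Nat) : Int) := by omega
  have h5 := pvPyRange_natCast 1 (bN + 1)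
  rw [Nat.cast_one] at h5
  rw [h2, h5, List.map_map]
  have hL : ∀ k ∈ List.range (bN + 1 - 1),
      ((fun l => PySem.List.slice l1 (some (i : Int)) (some ((i : Int) + l))) ∘
        (fun k : Nat => ((1 + k : Nat) : Int))) k = s.take (k + 1) := by
    intro k _
    simp only [Function.comp]
    have : (i : Int) + ((1 + k : Nat) : Int) = ((i + (1 + k) : Nat) : Int) := by push_cast; ring
    rw [this, PySem.List.slice_natCast]
    have h3 : i + (1 + k) - i = k + 1 := by omega
    rw [h3, hsdef]
  rw [List.map_congr_left hL]
  have h4 : bN + 1 - 1 = bN := by omega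
  rw [h4]
  -- right side: filter over the chain written as a map
  rw [pvChain_eq_map]
  simp only [List.nil_append]
  rw [List.filter_map]
  have hpred : ∀ k ∈ List.range s.length,
      ((fun u => PySem.Set.contains (PySem.Set.ofList (pvE l2)) u) ∘
          fun a => List.take (a + 1) s) k
        = decide (k < bN) := by
    intro k hk
    have hk' : k < s.length := List.mem_range.mp hk
    simp only [Function.comp]
    rw [Bool.eq_iff_iff, contains_iff_mem, PySem.Set.mem_ofList, mem_pvE, decide_eq_true_iff]
    have hne : s.take (k + 1) ≠ [] := by
      intro h
      rw [List.take_eq_nil_iff] at h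
      rcases h with h | h
      · omega
      · rw [h] at hk'; simp at hk'
    rw [infix_iff_lt_maxD s l2 k hk', ← hb]
    constructor
    · rintro ⟨-, h⟩; omega
    · intro h; exact ⟨hne, by omega⟩
  rw [List.filter_congr hpred, range_filter_lt bN s.length (by omega)]

-- the whole emission list equals the filtered pvE, from start index i onwards
lemma emit_eq (l1 l2 : List Int) : ∀ (xs : List Int) (i : Nat), xs = l1.drop i →
    (PySem.List.enumerate (pvBest l2 xs) (i : Int)).flatMap
        (fun ib => (PySem.List.pyRange 1 (ib.2 + 1)).map
          (fun l => PySem.List.slice l1 (some ib.1) (some (ib.1 + l))))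
      = (pvE xs).filter
          (fun u => PySem.Set.contains (PySem.Set.ofList (pvE l2)) u) := by
  intro xs
  induction xs with
  | nil => intro i _; rfl
  | cons x rest ih =>
    intro i hx
    have hrest : rest = l1.drop (i + 1) := by
      have := congrArg List.tail hx
      simpa [List.tail_drop] using this
    rw [pvBest, PySem.List.enumerate_cons, List.flatMap_cons]
    have hcast : (i : Int) + 1 = ((i + 1 : Nat) : Int) := by push_cast; ring
    rw [hcast, ih (i + 1) hrest]
    have hgrp := group_eq l1 l2 i (by rw [← hx]; simp)
    rw [← hx] at hgrp
    show (PySem.List.pyRange 1 (pvMaxD (pvMRow (x :: rest) l2) + 1)).map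
        (fun l => PySem.List.slice l1 (some (i : Int)) (some ((i : Int) + l))) ++ _ = _
    rw [hgrp, pvE_cons, List.filter_append]

-- ===== VERDICT (by name: the statement is the Claim_ definition above) =====
theorem find_common_subsequences___py_spec : Claim_equal_find_common_subsequences___py := by
  intro list1 list2 _
  unfold Spec_find_common_subsequences___py
  unfold find_common_subsequences___py find_common_subsequences___py_alt
  have hof : ∀ xs : List (List Int),
      List.foldl PySem.Set.add PySem.Set.empty xs = PySem.Set.ofList xs := fun _ => rfl
  simp only [pvLoop_spec, List.reverse_reverse]
  rw [foldl_emit_eq_flatMap, show ((0 : Int) = ((0 : Nat) : Int)) from rfl,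
    emit_eq list1 list2 list1 0 (by simp)]
  rw [pvSubsA_eq_pvE, pvSubsA_eq_pvE]
  rw [PySem.Set.inter, PySem.Set.ofList_eq_foldl (pvE list1), foldl_add_filter]
  rfl
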